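-- pv_equiv track=rewrite | github.com/andrey-yemelyanov/competitive-programming | cp-book/ch2/lineards/_1darraymanip/_10978_LetsPlayMagic.py | empty_slot
-- ===== SOURCE A (Python) =====
-- EMPTY = ""
--
-- def empty_slot(arrangement, start_pos, n_steps):
-- 	pos = start_pos
-- 	dist = 0
-- 	while dist < n_steps:
-- 		pos = (pos + 1) % len(arrangement)
-- 		if arrangement[pos] == EMPTY:
-- 			dist += 1
-- 	return pos
-- ===== SOURCE B (Python) =====
-- EMPTY = ""
--
-- def empty_slot(arrangement, start_pos, n_steps):
--     if n_steps <= 0: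
--         return start_pos
--     empties = [i for i, s in enumerate(arrangement) if s == EMPTY]
--     first = (start_pos + 1) % len(arrangement)
--     idx = sum(1 for e in empties if e < first)
--     return empties[(idx + n_steps - 1) % len(empties)]
-- ===== Notes on version B (the rewrite author's own statement) =====
-- stated objective: faster
-- what changed: Replaces the step-by-step circular walk (one loop iteration per slot visited, O(n_steps*len)) by precomputing the list of empty-slot indices once and picking the answer directly with modular arithmetic on that list.
import Mathlib
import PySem

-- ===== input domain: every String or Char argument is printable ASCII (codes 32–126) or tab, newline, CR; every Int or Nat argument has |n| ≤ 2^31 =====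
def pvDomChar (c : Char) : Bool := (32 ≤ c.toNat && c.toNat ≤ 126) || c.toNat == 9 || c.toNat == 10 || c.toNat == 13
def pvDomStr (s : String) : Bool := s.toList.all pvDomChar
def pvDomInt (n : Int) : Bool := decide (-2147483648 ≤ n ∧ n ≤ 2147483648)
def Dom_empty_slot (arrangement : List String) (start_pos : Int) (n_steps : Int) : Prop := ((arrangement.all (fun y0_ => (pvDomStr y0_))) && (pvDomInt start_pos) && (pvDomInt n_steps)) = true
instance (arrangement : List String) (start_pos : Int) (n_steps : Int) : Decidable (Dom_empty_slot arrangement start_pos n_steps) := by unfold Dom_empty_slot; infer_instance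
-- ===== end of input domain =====

-- B precomputes the list of empty-slot indices once and answers by modular indexing
-- into it, replacing A's one-iteration-per-visited-slot circular walk (objective: faster).

-- ===== PORT A =====
-- A's while loop, fuel-bounded: inside Pre_ the loop makes at most n_steps*len(arrangement)
-- iterations (each of the n_steps empties is found within len(arrangement) steps), so this
-- fuel suffices and the fuel-exhausted fallback is never reached (proved in loop_eq below).
def emptySlotLoop (arr : List String) : Nat → Int → Int → Int → Int
  | 0, pos, _, _ => pos
  | fuel + 1, pos, dist, n =>
    if dist < n then
      let pos' := PySem.Int.mod (pos + 1) (arr.length : Int)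
      if PySem.List.pyGet? arr pos' == some "" then
        emptySlotLoop arr fuel pos' (dist + 1) n
      else
        emptySlotLoop arr fuel pos' dist n
    else pos

def empty_slot (arrangement : List String) (start_pos : Int) (n_steps : Int) : Int :=
  emptySlotLoop arrangement (n_steps.toNat * arrangement.length) start_pos 0 n_steps

-- ===== PORT B =====
-- empties = [i for i, s in enumerate(arrangement) if s == EMPTY]
def emptiesOf (arr : List String) : List Int :=
  ((PySem.List.enumerate arr 0).filter (fun p => p.2 == "")).map (fun p => p.1)

def empty_slot_alt (arrangement : List String) (start_pos : Int) (n_steps : Int) : Int :=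
  if n_steps ≤ 0 then start_pos
  else
    let empties := emptiesOf arrangement
    let first := PySem.Int.mod (start_pos + 1) (arrangement.length : Int)
    let idx : Int := (empties.countP (fun e => decide (e < first)) : Int)
    PySem.List.pyGetD empties (PySem.Int.mod (idx + n_steps - 1) (empties.length : Int)) 0

-- ===== PRECONDITION & SPEC =====
-- Pre_ excludes only inputs where A never returns: with n_steps > 0, A raises
-- ZeroDivisionError on an empty arrangement and loops forever when no slot is empty.
def Pre_empty_slot (arrangement : List String) (start_pos : Int) (n_steps : Int) : Prop :=
  n_steps ≤ 0 ∨ "" ∈ arrangement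
instance (arrangement : List String) (start_pos : Int) (n_steps : Int) : Decidable (Pre_empty_slot arrangement start_pos n_steps) := by unfold Pre_empty_slot; infer_instance

def pvWitness_empty_slot : List String × Int × Int := (["x", "", "y", ""], 2, 5)

def Spec_empty_slot (arrangement : List String) (start_pos : Int) (n_steps : Int) (out : Int) : Prop := out = empty_slot_alt arrangement start_pos n_steps
instance (arrangement : List String) (start_pos : Int) (n_steps : Int) (out : Int) : Decidable (Spec_empty_slot arrangement start_pos n_steps out) := by unfold Spec_empty_slot; infer_instance

-- ===== CLAIM (what is proved, stated in full; the proofs are below) =====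
def Claim_equal_empty_slot : Prop := ∀ (arrangement : List String) (start_pos : Int) (n_steps : Int), Dom_empty_slot arrangement start_pos n_steps → Pre_empty_slot arrangement start_pos n_steps → Spec_empty_slot arrangement start_pos n_steps (empty_slot arrangement start_pos n_steps)

-- ===== LEMMAS AND PROOFS =====

-- B's result for m remaining empties, starting the search after position p (proof-side view of B's body).
def tgt (arr : List String) (m : Int) (p : Int) : Int :=
  PySem.List.pyGetD (emptiesOf arr)
    (PySem.Int.mod
      (((emptiesOf arr).countP (fun e => decide (e < PySem.Int.mod (p + 1) (arr.length : Int))) : Int) + m - 1)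
      ((emptiesOf arr).length : Int)) 0

theorem alt_eq_tgt (arr : List String) (p n : Int) (hn : 0 < n) :
    empty_slot_alt arr p n = tgt arr n p := by
  simp [empty_slot_alt, tgt, if_neg (by omega : ¬ n ≤ 0)]

theorem mem_emptiesOf (arr : List String) (e : Int) :
    e ∈ emptiesOf arr ↔ ∃ (k : Nat), ∃ (_ : k < arr.length), e = (k : Int) ∧ arr[k] = "" := by
  simp only [emptiesOf, List.mem_map, List.mem_filter, PySem.List.mem_enumerate_iff]
  constructor
  · rintro ⟨p, ⟨⟨k, hk, rfl⟩, hs⟩, rfl⟩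
    exact ⟨k, hk, by simp, by simpa using hs⟩
  · rintro ⟨k, hk, rfl, hs⟩
    exact ⟨(0 + (k : Int), arr[k]), ⟨⟨k, hk, rfl⟩, by simpa using hs⟩, by simp⟩

theorem mem_emptiesOf' (arr : List String) (e : Int) :
    e ∈ emptiesOf arr ↔ 0 ≤ e ∧ e < (arr.length : Int) ∧ PySem.List.pyGet? arr e = some "" := by
  rw [mem_emptiesOf]
  constructor
  · rintro ⟨k, hk, rfl, hs⟩
    refine ⟨Int.natCast_nonneg k, by exact_mod_cast hk, ?_⟩
    rw [PySem.List.pyGet?_natCast]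
    simp [List.getElem?_eq_getElem hk, hs]
  · rintro ⟨h0, h1, hg⟩
    refine ⟨e.toNat, by omega, by omega, ?_⟩
    rw [PySem.List.pyGet?_of_nonneg _ h0] at hg
    have hlt : e.toNat < arr.length := by omega
    simpa [List.getElem?_eq_getElem hlt] using hg

theorem pairwise_emptiesOf (arr : List String) : (emptiesOf arr).Pairwise (· < ·) := by
  unfold emptiesOf
  rw [List.pairwise_map]
  exact (PySem.List.pairwise_lt_enumerate arr 0).filter _

theorem emptiesOf_ne_nil (arr : List String) (hm : "" ∈ arr) : emptiesOf arr ≠ [] := by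
  obtain ⟨k, hk, he⟩ := List.mem_iff_getElem.mp hm
  intro h
  have : (k : Int) ∈ emptiesOf arr := (mem_emptiesOf arr _).mpr ⟨k, hk, rfl, he⟩
  simp [h] at this

-- countP (< q+1) = countP (< q) + count q
theorem countP_lt_succ (E : List Int) (q : Int) :
    E.countP (fun e => decide (e < q + 1)) = E.countP (fun e => decide (e < q)) + E.count q := by
  induction E with
  | nil => simp
  | cons a t ih =>
    simp only [List.countP_cons, List.count_cons, ih, beq_iff_eq]
    rcases lt_trichotomy a q with h | h | h
    · simp [h, (show a < q + 1 by omega), (show ¬ a = q by omega)]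
      omega
    · subst h
      simp [(show a < a + 1 by omega)]
      omega
    · simp [(show ¬ a < q by omega), (show ¬ a < q + 1 by omega), (show ¬ a = q by omega)]

-- in a strictly increasing list, countP (< q) is the index of q
theorem countP_lt_index (E : List Int) (hp : E.Pairwise (· < ·)) (q : Int) (hq : q ∈ E) :
    E.countP (fun e => decide (e < q)) < E.length ∧
      E[E.countP (fun e => decide (e < q))]? = some q := by
  induction E with
  | nil => simp at hq
  | cons a t ih =>
    rcases List.pairwise_cons.mp hp with ⟨ha, hp'⟩
    rcases List.mem_cons.mp hq with rfl | hq'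
    · have h0 : t.countP (fun e => decide (e < q)) = 0 :=
        List.countP_eq_zero.mpr (fun b hb => by have := ha b hb; simp; omega)
      simp [h0]
    · have haq : a < q := ha q hq'
      obtain ⟨hlt, hget⟩ := ih hp' hq'
      have hidx : (a :: t).countP (fun e => decide (e < q))
          = t.countP (fun e => decide (e < q)) + 1 := by simp [List.countP_cons, haq]
      refine ⟨?_, ?_⟩
      · rw [hidx]
        simp only [List.length_cons]
        omega
      · rw [hidx]
        simpa using hget

-- one circular step advances B's count by the emptiness indicator, mod the number of empties
theorem cnt_step (arr : List String) (q : Int) (h0 : 0 ≤ q) (h1 : q < (arr.length : Int)) :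
    (((emptiesOf arr).countP (fun e => decide (e < (q + 1) % (arr.length : Int))) : Int)) % ((emptiesOf arr).length : Int)
      = (((emptiesOf arr).countP (fun e => decide (e < q)) : Int)
          + (if PySem.List.pyGet? arr q = some "" then 1 else 0)) % ((emptiesOf arr).length : Int) := by
  set E := emptiesOf arr with hE
  have hcount : (E.count q : Int) = if PySem.List.pyGet? arr q = some "" then 1 else 0 := by
    by_cases hg : PySem.List.pyGet? arr q = some ""
    · have hqE : q ∈ E := (mem_emptiesOf' arr q).mpr ⟨h0, h1, hg⟩
      rw [if_pos hg]
      exact_mod_cast List.count_eq_one_of_mem ((pairwise_emptiesOf arr).nodup) hqE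
    · have hqE : q ∉ E := fun h => hg ((mem_emptiesOf' arr q).mp h).2.2
      rw [if_neg hg]
      exact_mod_cast List.count_eq_zero_of_not_mem hqE
  by_cases hend : q + 1 < (arr.length : Int)
  · have hq1 : (q + 1) % (arr.length : Int) = q + 1 := Int.emod_eq_of_lt (by omega) hend
    rw [hq1]
    congr 1
    rw [← hcount]
    have := countP_lt_succ E q
    omega
  · have hq1 : q + 1 = (arr.length : Int) := by omega
    have hmod0 : (q + 1) % (arr.length : Int) = 0 := by rw [hq1]; exact Int.emod_self
    rw [hmod0]
    have hc0 : E.countP (fun e => decide (e < (0 : Int))) = 0 :=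
      List.countP_eq_zero.mpr (fun b hb => by
        have := ((mem_emptiesOf' arr b).mp hb).1; simp; omega)
    have hfull : E.countP (fun e => decide (e < q + 1)) = E.length :=
      List.countP_eq_length.mpr (fun b hb => by
        have := ((mem_emptiesOf' arr b).mp hb).2.1; simp; omega)
    have hsum : ((E.countP (fun e => decide (e < q)) : Int)
        + (if PySem.List.pyGet? arr q = some "" then 1 else 0)) = (E.length : Int) := by
      rw [← hcount]
      have h2 := countP_lt_succ E q
      rw [hfull] at h2
      omega
    rw [hc0, hsum]
    simp

-- the fueled loop with dist already n returns immediately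
theorem loop_done (arr : List String) (fuel : Nat) (q n : Int) :
    emptySlotLoop arr fuel q n n = q := by
  cases fuel <;> simp [emptySlotLoop]

-- gap existence with bound: from any position, within len(arr) circular steps an empty slot is hit
theorem gap_aux (arr : List String) (hm : "" ∈ arr) (p : Int) :
    ∃ t : Nat, t < arr.length ∧
      PySem.List.pyGet? arr ((p + 1 + (t : Int)) % (arr.length : Int)) = some "" := by
  obtain ⟨k, hk, he⟩ := List.mem_iff_getElem.mp hm
  have hL : (0 : Int) < (arr.length : Int) := by exact_mod_cast Nat.zero_lt_of_lt hk
  set t : Int := ((k : Int) - p - 1) % (arr.length : Int) with ht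
  have htn : 0 ≤ t := Int.emod_nonneg _ (by omega)
  have htl : t < (arr.length : Int) := Int.emod_lt_of_pos _ hL
  refine ⟨t.toNat, by omega, ?_⟩
  rw [Int.toNat_of_nonneg htn]
  have hmod : (p + 1 + t) % (arr.length : Int) = (k : Int) := by
    rw [ht]
    rw [add_comm (p + 1) _, Int.emod_add_emod]
    have : (k : Int) - p - 1 + (p + 1) = (k : Int) := by ring
    rw [this]
    exact Int.emod_eq_of_lt (by positivity) (by exact_mod_cast hk)
  rw [hmod, PySem.List.pyGet?_natCast]
  simp [List.getElem?_eq_getElem hk, he]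

theorem gapEx (arr : List String) (hm : "" ∈ arr) (p : Int) :
    ∃ t : Nat, PySem.List.pyGet? arr ((p + 1 + (t : Int)) % (arr.length : Int)) = some "" := by
  obtain ⟨t, _, h⟩ := gap_aux arr hm p
  exact ⟨t, h⟩

theorem gap_lt (arr : List String) (hm : "" ∈ arr) (p : Int) :
    Nat.find (gapEx arr hm p) < arr.length := by
  obtain ⟨t, htl, h⟩ := gap_aux arr hm p
  exact Nat.lt_of_le_of_lt (Nat.find_le h) htl

theorem gap_zero (arr : List String) (hm : "" ∈ arr) (p : Int)
    (h : PySem.List.pyGet? arr ((p + 1) % (arr.length : Int)) = some "") :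
    Nat.find (gapEx arr hm p) = 0 := by
  rw [Nat.find_eq_zero]
  simpa using h

theorem gap_shift (arr : List String) (hm : "" ∈ arr) (p : Int)
    (hne : ¬ PySem.List.pyGet? arr ((p + 1) % (arr.length : Int)) = some "") :
    Nat.find (gapEx arr hm p) = Nat.find (gapEx arr hm ((p + 1) % (arr.length : Int))) + 1 := by
  have key : ∀ g : Nat, (p + 1 + ((g : Int) + 1)) % (arr.length : Int)
      = ((p + 1) % (arr.length : Int) + 1 + (g : Int)) % (arr.length : Int) := by
    intro g
    conv_rhs => rw [add_assoc, Int.emod_add_emod]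
    ring_nf
  rw [Nat.find_eq_iff]
  constructor
  · have hg := Nat.find_spec (gapEx arr hm ((p + 1) % (arr.length : Int)))
    push_cast
    rw [key]
    exact hg
  · intro m hme
    match m with
    | 0 => simpa using hne
    | j + 1 =>
      have hj : j < Nat.find (gapEx arr hm ((p + 1) % (arr.length : Int))) := by omega
      have := Nat.find_min (gapEx arr hm ((p + 1) % (arr.length : Int))) hj
      push_cast
      rw [key]
      exact this

-- tgt transfer along one non-empty step
theorem tgt_step_ne (arr : List String) (hm : "" ∈ arr) (p m : Int)
    (hne : ¬ PySem.List.pyGet? arr ((p + 1) % (arr.length : Int)) = some "") :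
    tgt arr m ((p + 1) % (arr.length : Int)) = tgt arr m p := by
  have hL : (0 : Int) < (arr.length : Int) := by
    have := List.length_pos_of_mem hm; exact_mod_cast this
  have hk : (0 : Int) < ((emptiesOf arr).length : Int) := by
    have := emptiesOf_ne_nil arr hm
    have : 0 < (emptiesOf arr).length := List.length_pos_of_ne_nil this
    exact_mod_cast this
  set q := (p + 1) % (arr.length : Int) with hq
  have h0 : 0 ≤ q := Int.emod_nonneg _ (by omega)
  have h1 : q < (arr.length : Int) := Int.emod_lt_of_pos _ hL
  unfold tgt
  rw [PySem.Int.mod_eq_emod_of_pos hL, PySem.Int.mod_eq_emod_of_pos hL,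
      PySem.Int.mod_eq_emod_of_pos hk, PySem.Int.mod_eq_emod_of_pos hk, ← hq]
  congr 1
  have hc := cnt_step arr q h0 h1
  rw [if_neg hne] at hc
  have := Int.ModEq.add_right (m - 1) hc
  simpa [add_assoc, add_sub_assoc] using this

-- tgt transfer along one empty step (more than one empty still to find)
theorem tgt_step_eq (arr : List String) (hm : "" ∈ arr) (p m : Int)
    (he : PySem.List.pyGet? arr ((p + 1) % (arr.length : Int)) = some "") :
    tgt arr (m - 1) ((p + 1) % (arr.length : Int)) = tgt arr m p := by
  have hL : (0 : Int) < (arr.length : Int) := by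
    have := List.length_pos_of_mem hm; exact_mod_cast this
  have hk : (0 : Int) < ((emptiesOf arr).length : Int) := by
    have := emptiesOf_ne_nil arr hm
    have : 0 < (emptiesOf arr).length := List.length_pos_of_ne_nil this
    exact_mod_cast this
  set q := (p + 1) % (arr.length : Int) with hq
  have h0 : 0 ≤ q := Int.emod_nonneg _ (by omega)
  have h1 : q < (arr.length : Int) := Int.emod_lt_of_pos _ hL
  unfold tgt
  rw [PySem.Int.mod_eq_emod_of_pos hL, PySem.Int.mod_eq_emod_of_pos hL,
      PySem.Int.mod_eq_emod_of_pos hk, PySem.Int.mod_eq_emod_of_pos hk, ← hq]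
  congr 1
  have hc := cnt_step arr q h0 h1
  rw [if_pos he] at hc
  have := Int.ModEq.add_right (m - 2) hc
  have h2 : (((emptiesOf arr).countP (fun e => decide (e < (q + 1) % (arr.length : Int))) : Int) + (m - 1) - 1)
      = ((emptiesOf arr).countP (fun e => decide (e < (q + 1) % (arr.length : Int))) : Int) + (m - 2) := by ring
  have h3 : (((emptiesOf arr).countP (fun e => decide (e < q)) : Int) + m - 1)
      = (((emptiesOf arr).countP (fun e => decide (e < q)) : Int) + 1) + (m - 2) := by ring
  rw [h2, h3]
  exact this

-- tgt for the last empty: the answer is the empty position itself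
theorem tgt_last (arr : List String) (hm : "" ∈ arr) (p : Int)
    (he : PySem.List.pyGet? arr ((p + 1) % (arr.length : Int)) = some "") :
    tgt arr 1 p = (p + 1) % (arr.length : Int) := by
  have hL : (0 : Int) < (arr.length : Int) := by
    have := List.length_pos_of_mem hm; exact_mod_cast this
  set q := (p + 1) % (arr.length : Int) with hq
  have h0 : 0 ≤ q := Int.emod_nonneg _ (by omega)
  have h1 : q < (arr.length : Int) := Int.emod_lt_of_pos _ hL
  have hqE : q ∈ emptiesOf arr := (mem_emptiesOf' arr q).mpr ⟨h0, h1, he⟩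
  obtain ⟨hlt, hget⟩ := countP_lt_index (emptiesOf arr) (pairwise_emptiesOf arr) q hqE
  have hk : (0 : Int) < ((emptiesOf arr).length : Int) := by exact_mod_cast Nat.zero_lt_of_lt hlt
  unfold tgt
  rw [PySem.Int.mod_eq_emod_of_pos hL, ← hq]
  have hidx : (((emptiesOf arr).countP (fun e => decide (e < q)) : Int) + 1 - 1)
      = ((emptiesOf arr).countP (fun e => decide (e < q)) : Int) := by ring
  rw [hidx, PySem.Int.mod_eq_emod_of_pos hk,
      Int.emod_eq_of_lt (Int.natCast_nonneg _) (by exact_mod_cast hlt),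
      PySem.List.pyGetD_natCast, List.getD_eq_getElem?_getD, hget]
  rfl

-- main loop invariant: with enough fuel, A's loop computes B's modular-index answer
theorem loop_eq (arr : List String) (hm : "" ∈ arr) :
    ∀ (fuel : Nat) (p d n : Int), d < n →
      (n - d - 1).toNat * arr.length + Nat.find (gapEx arr hm p) + 1 ≤ fuel →
      emptySlotLoop arr fuel p d n = tgt arr (n - d) p := by
  have hL : (0 : Int) < (arr.length : Int) := by
    have := List.length_pos_of_mem hm; exact_mod_cast this
  intro fuel
  induction fuel with
  | zero => intro p d n _ hf; omega
  | succ f ih =>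
    intro p d n hd hf
    have hmodeq : PySem.Int.mod (p + 1) (arr.length : Int) = (p + 1) % (arr.length : Int) :=
      PySem.Int.mod_eq_emod_of_pos hL
    set q := (p + 1) % (arr.length : Int) with hq
    by_cases he : PySem.List.pyGet? arr q = some ""
    · -- step hits an empty slot
      have hfind0 : Nat.find (gapEx arr hm p) = 0 := gap_zero arr hm p he
      by_cases hlast : d + 1 < n
      · have hmul : (n - d - 1).toNat * arr.length
            = (n - d - 2).toNat * arr.length + arr.length := by
          rw [show (n - d - 1).toNat = (n - d - 2).toNat + 1 by omega, Nat.succ_mul]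
        have hgap : Nat.find (gapEx arr hm q) < arr.length := gap_lt arr hm q
        have hf' : (n - (d + 1) - 1).toNat * arr.length + Nat.find (gapEx arr hm q) + 1 ≤ f := by
          have : (n - (d + 1) - 1).toNat = (n - d - 2).toNat := by omega
          rw [this]
          omega
        have := ih q (d + 1) n hlast hf'
        simp only [emptySlotLoop, if_pos hd, hmodeq, ← hq, he, beq_self_eq_true, if_pos]
        rw [this]
        have := tgt_step_eq arr hm p (n - d) he
        rw [show n - (d + 1) = n - d - 1 by ring]
        exact this
      · have hdn : d + 1 = n := by omega
        simp only [emptySlotLoop, if_pos hd, hmodeq, ← hq, he, beq_self_eq_true, if_pos]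
        rw [hdn, loop_done]
        rw [show n - d = 1 by omega]
        exact (tgt_last arr hm p he).symm
    · -- step hits an occupied slot
      have hfind : Nat.find (gapEx arr hm p) = Nat.find (gapEx arr hm q) + 1 :=
        gap_shift arr hm p he
      have hf' : (n - d - 1).toNat * arr.length + Nat.find (gapEx arr hm q) + 1 ≤ f := by omega
      have hbeq : (PySem.List.pyGet? arr q == some "") = false := by
        simpa [beq_iff_eq] using he
      simp only [emptySlotLoop, if_pos hd, hmodeq, ← hq, hbeq, Bool.false_eq_true, if_neg,
        not_false_eq_true]
      rw [ih q d n hd hf']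
      exact tgt_step_ne arr hm p (n - d) he

-- ===== VERDICT (by name: the statement is the Claim_ definition above) =====
theorem empty_slot_spec : Claim_equal_empty_slot := by
  intro arr p n _ hpre
  unfold Spec_empty_slot
  by_cases hn : n ≤ 0
  · simp [empty_slot, empty_slot_alt, hn, show n.toNat = 0 by omega, emptySlotLoop]
  · have hm : "" ∈ arr := hpre.resolve_left hn
    rw [alt_eq_tgt arr p n (by omega)]
    unfold empty_slot
    have hgap : Nat.find (gapEx arr hm p) < arr.length := gap_lt arr hm p
    have hmul : n.toNat * arr.length = (n - 0 - 1).toNat * arr.length + arr.length := by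
      rw [show n.toNat = (n - 0 - 1).toNat + 1 by omega, Nat.succ_mul]
    have := loop_eq arr hm (n.toNat * arr.length) p 0 n (by omega) (by omega)
    rw [this, show n - 0 = n by ring]
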